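-- pv_equiv track=rewrite | github.com/redrockhorse/python | test/testContinuousArray.py | fillInterrupted
-- ===== SOURCE A (Python) =====
-- def fillInterrupted(array):
--     interruptePoint = []
--     for i in range(len(array)-1):
--         if array[i+1] - array[i]>1:
--             interruptePoint.append([array[i],array[i+1]])
--     n = len(interruptePoint)
--     for j in range(n):
--         if n%2 == (j+1)%2:
--             tmp = interruptePoint[j]
--             p = array.index(tmp[0])+1
--             for  a  in range(tmp[0]+1,tmp[1]):
--                 array.insert(p,a)
--                 p+=1
--     return  array
-- ===== SOURCE B (Python) =====
-- def _expand_first(xs, lo, hi):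
--     # one forward pass: copy until the first occurrence of lo, emit the
--     # missing block lo+1..hi-1 right after it, then copy the rest
--     out = []
--     it = iter(xs)
--     for v in it:
--         out.append(v)
--         if v == lo:
--             out.extend(range(lo + 1, hi))
--             out.extend(it)
--             break
--     return out
--
-- def fillInterrupted(array):
--     # Walk the adjacent pairs from the RIGHT with a toggle: a gap is filled
--     # iff an even number of gaps follow it (equivalent to A's n%2==(j+1)%2
--     # rule, but needs no gap count).  Each chosen gap is then filled
--     # left-to-right by replacing the first occurrence of its left endpoint
--     # with the whole missing block in one pass (no .index, no insert).
--     fills = []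
--     take = True
--     for lo, hi in reversed(list(zip(array, array[1:]))):
--         if hi - lo > 1:
--             if take:
--                 fills.append((lo, hi))
--             take = not take
--     out = array
--     for lo, hi in reversed(fills):
--         out = _expand_first(out, lo, hi)
--     return out
-- ===== Notes on version B (the rewrite author's own statement) =====
-- stated objective: alternative
-- what changed: B replaces A's count-then-modular-parity selection by a right-to-left toggle over the adjacent pairs (a gap is filled iff an even number of gaps follow it) and replaces A's .index lookup plus per-element list.insert loop by a single forward pass that rewrites the list, expanding the first occurrence of the gap's left endpoint into the whole missing block.
import Mathlib
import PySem

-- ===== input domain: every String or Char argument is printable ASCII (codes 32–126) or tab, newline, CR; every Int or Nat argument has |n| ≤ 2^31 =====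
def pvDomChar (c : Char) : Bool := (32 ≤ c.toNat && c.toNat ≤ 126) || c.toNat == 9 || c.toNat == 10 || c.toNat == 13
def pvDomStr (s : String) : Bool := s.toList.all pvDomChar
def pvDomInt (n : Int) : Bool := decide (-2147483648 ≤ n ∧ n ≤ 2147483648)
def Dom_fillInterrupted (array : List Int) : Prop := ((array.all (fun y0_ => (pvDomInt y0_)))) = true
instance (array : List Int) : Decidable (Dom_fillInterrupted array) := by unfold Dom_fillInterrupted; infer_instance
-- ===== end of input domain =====

-- B scans the adjacent pairs from the RIGHT with a toggle (a gap is filled iff an even number of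
-- gaps follow it — no gap count, no modular index arithmetic) and fills each chosen gap by
-- replacing the first occurrence of its left endpoint with the whole missing block in one forward
-- pass (no .index, no per-element insert); equivalence is about the RETURN value only (Python A
-- mutates its argument in place, B builds new lists).

-- ===== PORT A =====
def fillInterrupted (array : List Int) : List Int :=
  let interruptePoint : List (Int × Int) :=
    (PySem.List.pyRange 0 ((array.length : Int) - 1) 1).foldl
      (fun acc i =>
        if PySem.List.pyGetD array (i + 1) 0 - PySem.List.pyGetD array i 0 > 1 then
          acc ++ [(PySem.List.pyGetD array i 0, PySem.List.pyGetD array (i + 1) 0)]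
        else acc) []
  let n : Int := interruptePoint.length
  (PySem.List.pyRange 0 n 1).foldl
    (fun arr j =>
      if PySem.Int.mod n 2 = PySem.Int.mod (j + 1) 2 then
        let tmp := PySem.List.pyGetD interruptePoint j (0, 0)
        let p : Int := (((PySem.List.index? arr tmp.1).getD 0 : Nat) : Int) + 1
        ((PySem.List.pyRange (tmp.1 + 1) tmp.2 1).foldl
            (fun (st : List Int × Int) a => (PySem.List.insert st.1 st.2 a, st.2 + 1))
            (arr, p)).1
      else arr) array

-- ===== PORT B =====
-- _expand_first: copy until the first occurrence of lo, emit lo+1..hi-1 after it, copy the rest.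
def pvExpandFirst (xs : List Int) (lo hi : Int) : List Int :=
  match xs with
  | [] => []
  | v :: rest =>
      if v = lo then v :: (PySem.List.pyRange (lo + 1) hi 1 ++ rest)
      else v :: pvExpandFirst rest lo hi

def fillInterrupted_alt (array : List Int) : List Int :=
  let st :=
    ((array.zip (PySem.List.slice array (some 1) none)).reverse).foldl
      (fun (st : List (Int × Int) × Bool) g =>
        if g.2 - g.1 > 1 then
          (if st.2 then st.1 ++ [g] else st.1, !st.2)
        else st) ([], true)
  st.1.reverse.foldl (fun out g => pvExpandFirst out g.1 g.2) array

-- ===== PRECONDITION & SPEC =====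
def Spec_fillInterrupted (array : List Int) (out : List Int) : Prop := out = fillInterrupted_alt array
instance (array : List Int) (out : List Int) : Decidable (Spec_fillInterrupted array out) := by unfold Spec_fillInterrupted; infer_instance

-- ===== CLAIM (what is proved, stated in full; the proofs are below) =====
def Claim_equal_fillInterrupted : Prop := ∀ (array : List Int), Dom_fillInterrupted array → Spec_fillInterrupted array (fillInterrupted array)

-- ===== LEMMAS AND PROOFS =====

-- The gap list both programs are about: adjacent pairs with a hole between them.
def pvGaps (array : List Int) : List (Int × Int) :=
  (array.zip (PySem.List.slice array (some 1) none)).filter (fun g => decide (g.2 - g.1 > 1))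

-- Splice of one gap's missing block right after the first occurrence of its left endpoint.
def pvSplice (arr : List Int) (g : Int × Int) : List Int :=
  let i : Nat := (PySem.List.index? arr g.1).getD 0 + 1
  arr.take i ++ PySem.List.pyRange (g.1 + 1) g.2 1 ++ arr.drop i

-- The gaps selected by a forward toggle starting at b (true = fill this gap).
def pvSelect : List (Int × Int) → Bool → List (Int × Int)
  | [], _ => []
  | g :: t, b => (if b then [g] else []) ++ pvSelect t !b

-- A's per-element insert loop, started at position p ≤ length, is a block splice at p.
theorem pvFill_eq (a b : Int) : ∀ (arr : List Int) (p : Nat), p ≤ arr.length →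
    ((PySem.List.pyRange a b 1).foldl
        (fun (st : List Int × Int) x => (PySem.List.insert st.1 st.2 x, st.2 + 1))
        (arr, (p : Int))).1
      = arr.take p ++ PySem.List.pyRange a b 1 ++ arr.drop p := by
  induction hk : (b - a).toNat generalizing a with
  | zero =>
    intro arr p hp
    have hba : b ≤ a := by omega
    rw [PySem.List.pyRange_one_eq_nil hba]
    simp
  | succ k ih =>
    intro arr p hp
    have hab : a < b := by omega
    rw [PySem.List.pyRange_one_cons hab]
    simp only [List.foldl_cons]
    rw [PySem.List.insert_natCast arr p a hp]
    have : ((p:Int) + 1) = (((p+1 : Nat)):Int) := by push_cast; ring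
    rw [this]
    have hlen : p + 1 ≤ (arr.take p ++ a :: arr.drop p).length := by
      simp; omega
    rw [ih (a+1) (by omega) _ (p+1) hlen]
    have htk : (arr.take p ++ a :: arr.drop p).take (p+1) = arr.take p ++ [a] := by
      rw [List.take_append]
      simp [List.length_take, Nat.min_eq_left hp]
    have hdr : (arr.take p ++ a :: arr.drop p).drop (p+1) = arr.drop p := by
      rw [List.drop_append]
      simp [List.length_take, Nat.min_eq_left hp]
    rw [htk, hdr]
    simp

-- Splicing never removes elements.
theorem pvMem_splice {x : Int} {arr : List Int} (g : Int × Int) (hx : x ∈ arr) :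
    x ∈ pvSplice arr g := by
  unfold pvSplice
  have h := List.take_append_drop ((PySem.List.index? arr g.1).getD 0 + 1) arr
  rw [← h] at hx
  simp only [List.mem_append] at hx ⊢
  tauto

-- A's body on one gap equals the splice when the gap's left endpoint is present.
theorem pvBody_eq (arr : List Int) (g : Int × Int) (h : g.1 ∈ arr) :
    ((PySem.List.pyRange (g.1 + 1) g.2 1).foldl
        (fun (st : List Int × Int) x => (PySem.List.insert st.1 st.2 x, st.2 + 1))
        (arr, (((PySem.List.index? arr g.1).getD 0 : Nat) : Int) + 1)).1
      = pvSplice arr g := by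
  obtain ⟨idx, hidx⟩ := Option.isSome_iff_exists.mp ((PySem.List.index?_isSome_iff (xs := arr) (v := g.1)).mpr h)
  obtain ⟨hlt, -, -⟩ := PySem.List.getElem_of_index?_eq_some hidx
  rw [hidx]
  have hcast : ((((some idx).getD 0 : Nat)) : Int) + 1 = (((idx + 1 : Nat)) : Int) := by
    simp
  rw [hcast, pvFill_eq _ _ arr (idx+1) (by omega)]
  have hidx' : List.idxOf? g.1 arr = some idx := by
    rw [← PySem.List.index?_eq_idxOf?]; exact hidx
  simp [pvSplice, hidx']

-- A's parity-indexed enumerate fold is a forward toggle fold over the gap list.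
theorem pvLoop_eq (n : Int) : ∀ (gs : List (Int × Int)) (s : Int) (arr : List Int),
    (∀ g ∈ gs, g.1 ∈ arr) →
    (PySem.List.enumerate gs s).foldl
        (fun arr jg =>
          if PySem.Int.mod n 2 = PySem.Int.mod (jg.1 + 1) 2 then
            ((PySem.List.pyRange (jg.2.1 + 1) jg.2.2 1).foldl
                (fun (st : List Int × Int) x => (PySem.List.insert st.1 st.2 x, st.2 + 1))
                (arr, (((PySem.List.index? arr jg.2.1).getD 0 : Nat) : Int) + 1)).1
          else arr) arr
      = (gs.foldl
          (fun (st : List Int × Bool) g => (if st.2 then pvSplice st.1 g else st.1, !st.2))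
          (arr, decide (PySem.Int.mod n 2 = PySem.Int.mod (s + 1) 2))).1 := by
  intro gs
  induction gs with
  | nil => intro s arr _; simp [PySem.List.enumerate]
  | cons g gs ih =>
    intro s arr hmem
    have hcons : PySem.List.enumerate (g::gs) s = (s, g) :: PySem.List.enumerate gs (s+1) := by
      simp [PySem.List.enumerate]
    rw [hcons]
    simp only [List.foldl_cons]
    have hflip : (PySem.Int.mod n 2 = PySem.Int.mod (s + 1 + 1) 2)
        ↔ ¬ (PySem.Int.mod n 2 = PySem.Int.mod (s + 1) 2) := by
      rw [PySem.Int.mod_eq_emod_of_pos (by norm_num), PySem.Int.mod_eq_emod_of_pos (by norm_num),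
          PySem.Int.mod_eq_emod_of_pos (by norm_num)]
      omega
    by_cases hc : PySem.Int.mod n 2 = PySem.Int.mod (s + 1) 2
    · rw [if_pos hc]
      have harr' : ∀ g' ∈ gs, g'.1 ∈ pvSplice arr g := by
        intro g' hg'; exact pvMem_splice g (hmem g' (List.mem_cons_of_mem _ hg'))
      rw [pvBody_eq arr g (hmem g (List.mem_cons_self ..))]
      rw [ih (s+1) _ harr']
      have h1 : decide (PySem.Int.mod n 2 = PySem.Int.mod (s + 1) 2) = true := decide_eq_true hc
      have h2 : decide (PySem.Int.mod n 2 = PySem.Int.mod (s + 1 + 1) 2) = false :=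
        decide_eq_false (fun hx => (hflip.mp hx) hc)
      rw [h1, h2]
      simp
    · rw [if_neg hc]
      rw [ih (s+1) _ (fun g' hg' => hmem g' (List.mem_cons_of_mem _ hg'))]
      have h1 : decide (PySem.Int.mod n 2 = PySem.Int.mod (s + 1) 2) = false := decide_eq_false hc
      have h2 : decide (PySem.Int.mod n 2 = PySem.Int.mod (s + 1 + 1) 2) = true := decide_eq_true (hflip.mpr hc)
      rw [h1, h2]
      simp

-- A's index-comprehension of adjacent pairs is the zip of the list with its tail.
theorem pvMapRange_eq_zip (array : List Int) :
    (PySem.List.pyRange 0 ((array.length : Int) - 1) 1).map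
        (fun i => (PySem.List.pyGetD array i 0, PySem.List.pyGetD array (i + 1) 0))
      = array.zip (array.drop 1) := by
  apply List.ext_getElem
  · simp [PySem.List.length_pyRange_one]
  · intro k h1 h2
    have hk : k < array.length - 1 := by
      simp [PySem.List.length_pyRange_one] at h1; omega
    simp [List.getElem_map, List.getElem_zip, PySem.List.getElem_pyRange_one]
    constructor
    · simp [List.getElem?_eq_getElem (by omega : k < array.length)]
    · rw [show (k:Int) + 1 = (((k+1):Nat):Int) by push_cast; ring]
      rw [PySem.List.pyGetD_natCast]
      simp [List.getD_eq_getElem?_getD, List.getElem?_eq_getElem (by omega : k+1 < array.length)]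

-- A's append-fold over the index range builds exactly the gap list.
theorem pvGaps_eq (array : List Int) :
    (PySem.List.pyRange 0 ((array.length : Int) - 1) 1).foldl
      (fun acc i =>
        if PySem.List.pyGetD array (i + 1) 0 - PySem.List.pyGetD array i 0 > 1 then
          acc ++ [(PySem.List.pyGetD array i 0, PySem.List.pyGetD array (i + 1) 0)]
        else acc) []
      = pvGaps array := by
  have h := PySem.List.foldl_append_if
      (fun g : Int × Int => decide (g.2 - g.1 > 1)) (fun g => g)
      ((PySem.List.pyRange 0 ((array.length : Int) - 1) 1).map
        (fun i => (PySem.List.pyGetD array i 0, PySem.List.pyGetD array (i + 1) 0))) []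
  rw [List.foldl_map] at h
  simp only [decide_eq_true_eq] at h
  rw [h, pvMapRange_eq_zip]
  simp [pvGaps, PySem.List.slice_from_one, List.drop_one]

-- The forward toggle-splice fold applies the splice exactly to the selected gaps.
theorem pvToggleSplice_eq : ∀ (gs : List (Int × Int)) (b : Bool) (arr : List Int),
    (gs.foldl (fun (st : List Int × Bool) g => (if st.2 then pvSplice st.1 g else st.1, !st.2))
        (arr, b)).1
      = (pvSelect gs b).foldl pvSplice arr := by
  intro gs
  induction gs with
  | nil => intro b arr; simp [pvSelect]
  | cons g t ih =>
    intro b arr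
    cases b <;> simp [pvSelect, ih]

-- Selected gaps come from the gap list.
theorem pvSelect_subset {g : Int × Int} : ∀ (gs : List (Int × Int)) (b : Bool),
    g ∈ pvSelect gs b → g ∈ gs := by
  intro gs
  induction gs with
  | nil => intro b h; simp [pvSelect] at h
  | cons g' t ih =>
    intro b h
    cases b
    · simp only [pvSelect, Bool.false_eq_true, if_false, List.nil_append, Bool.not_false] at h
      exact List.mem_cons_of_mem _ (ih _ h)
    · simp only [pvSelect, if_true, Bool.not_true, List.singleton_append] at h
      rcases List.mem_cons.mp h with h | h
      · exact h ▸ List.mem_cons_self ..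
      · exact List.mem_cons_of_mem _ (ih _ h)

-- B's right-to-left collection, written as a foldr over the gap list.
def pvRev (t : List (Int × Int)) : List (Int × Int) × Bool :=
  t.foldr (fun g st => (if st.2 then st.1 ++ [g] else st.1, !st.2)) ([], true)

theorem pvRev_snd : ∀ (t : List (Int × Int)), (pvRev t).2 = decide (t.length % 2 = 0) := by
  intro t
  induction t with
  | nil => simp [pvRev]
  | cons g s ih =>
    have hstep : (pvRev (g :: s)).2 = !(pvRev s).2 := rfl
    rw [hstep, ih]
    simp only [List.length_cons]
    by_cases h : s.length % 2 = 0
    · have h2 : ¬ (s.length + 1) % 2 = 0 := by omega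
      simp [h, h2]
    · have h2 : (s.length + 1) % 2 = 0 := by omega
      simp [h, h2]

-- The reversed collection is exactly the forward toggle selection started at parity of the count.
theorem pvRev_reverse : ∀ (t : List (Int × Int)),
    (pvRev t).1.reverse = pvSelect t (decide (t.length % 2 = 1)) := by
  intro t
  induction t with
  | nil => simp [pvRev, pvSelect]
  | cons g s ih =>
    have hsnd := pvRev_snd s
    have hstep : (pvRev (g :: s)).1
        = (if (pvRev s).2 then (pvRev s).1 ++ [g] else (pvRev s).1) := rfl
    by_cases h : s.length % 2 = 0
    · have ht : (pvRev s).2 = true := by rw [hsnd]; exact decide_eq_true h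
      have hb : decide ((g :: s).length % 2 = 1) = true := by
        simp only [List.length_cons]; exact decide_eq_true (by omega)
      have hb' : decide (s.length % 2 = 1) = false := decide_eq_false (by omega)
      rw [hstep, ht, if_pos rfl, List.reverse_append, ih, hb', pvSelect, hb]
      simp
    · have ht : (pvRev s).2 = false := by rw [hsnd]; exact decide_eq_false h
      have hb : decide ((g :: s).length % 2 = 1) = false := by
        simp only [List.length_cons]; exact decide_eq_false (by omega)
      have hb' : decide (s.length % 2 = 1) = true := decide_eq_true (by omega)
      rw [hstep, ht, if_neg (by simp), ih, hb', pvSelect, hb]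
      simp

-- Replacing the first occurrence of lo by the block is the splice, when lo is present.
theorem pvExpand_eq_splice : ∀ (arr : List Int) (lo hi : Int), lo ∈ arr →
    pvExpandFirst arr lo hi = pvSplice arr (lo, hi) := by
  intro arr
  induction arr with
  | nil => intro lo hi h; simp at h
  | cons v rest ih =>
    intro lo hi h
    by_cases hv : v = lo
    · subst hv
      rw [pvExpandFirst, if_pos rfl]
      simp only [pvSplice]
      rw [PySem.List.index?_cons_self]
      simp
    · have hlo : lo ∈ rest := by
        rcases List.mem_cons.mp h with h' | h'
        · exact absurd h'.symm hv
        · exact h'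
      rw [pvExpandFirst, if_neg hv, ih lo hi hlo]
      obtain ⟨i, hi'⟩ := Option.isSome_iff_exists.mp
        ((PySem.List.index?_isSome_iff (xs := rest) (v := lo)).mpr hlo)
      have hcons : PySem.List.index? (v :: rest) lo = some (i + 1) := by
        rw [PySem.List.index?_cons_of_ne rest hv, hi']; rfl
      simp only [pvSplice]
      rw [hi', hcons]
      simp [List.take_succ_cons, List.drop_succ_cons]

-- Applying the expand-first pass over a list of gaps is the splice fold, as long as each left
-- endpoint is present (splicing preserves membership).
theorem pvFoldExpand_eq : ∀ (l : List (Int × Int)) (arr : List Int),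
    (∀ g ∈ l, g.1 ∈ arr) →
    l.foldl (fun out g => pvExpandFirst out g.1 g.2) arr = l.foldl pvSplice arr := by
  intro l
  induction l with
  | nil => intro arr _; simp
  | cons g t ih =>
    intro arr hmem
    simp only [List.foldl_cons]
    rw [pvExpand_eq_splice arr g.1 g.2 (hmem g (List.mem_cons_self ..))]
    exact ih _ (fun g' hg' => pvMem_splice g (hmem g' (List.mem_cons_of_mem _ hg')))

theorem fillInterrupted_eq (array : List Int) :
    fillInterrupted array = fillInterrupted_alt array := by
  simp only [fillInterrupted, fillInterrupted_alt]
  rw [pvGaps_eq array]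
  have hmem : ∀ g ∈ pvGaps array, g.1 ∈ array := by
    intro g hg
    obtain ⟨a, b⟩ := g
    have hz : (a, b) ∈ array.zip (PySem.List.slice array (some 1) none) := List.mem_of_mem_filter hg
    exact (List.of_mem_zip hz).1
  -- A's side: enumerate fold → toggle-splice fold → fold over selected gaps
  have henum := PySem.List.enumerate_eq_map_pyRange (pvGaps array) ((0:Int), (0:Int))
  have hlen : PySem.List.len (pvGaps array) = ((pvGaps array).length : Int) := by
    simp [PySem.List.len]
  have hloop := pvLoop_eq ((pvGaps array).length : Int) (pvGaps array) 0 array hmem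
  rw [henum, List.foldl_map, hlen] at hloop
  simp only at hloop
  rw [hloop]
  have hflag : decide (PySem.Int.mod ((pvGaps array).length : Int) 2 = PySem.Int.mod (0 + 1) 2)
      = decide ((pvGaps array).length % 2 = 1) := by
    rw [decide_eq_decide]
    rw [PySem.Int.mod_eq_emod_of_pos (by norm_num), PySem.Int.mod_eq_emod_of_pos (by norm_num)]
    omega
  rw [hflag, pvToggleSplice_eq]
  -- B's side: collection fold → pvRev over the gap list → the same fold over selected gaps
  have hcollect :
      ((array.zip (PySem.List.slice array (some 1) none)).reverse).foldl
        (fun (st : List (Int × Int) × Bool) g =>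
          if g.2 - g.1 > 1 then
            (if st.2 then st.1 ++ [g] else st.1, !st.2)
          else st) ([], true)
      = pvRev (pvGaps array) := by
    rw [PySem.List.foldl_ite_eq_foldl_filter
      (p := fun g : Int × Int => g.2 - g.1 > 1)
      (f := fun (st : List (Int × Int) × Bool) g => (if st.2 then st.1 ++ [g] else st.1, !st.2))]
    rw [List.filter_reverse, List.foldl_reverse]
    rfl
  rw [hcollect, pvRev_reverse]
  exact (pvFoldExpand_eq _ array
    (fun g hg => hmem g (pvSelect_subset _ _ hg))).symm

-- ===== VERDICT (by name: the statement is the Claim_ definition above) =====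
theorem fillInterrupted_spec : Claim_equal_fillInterrupted := by
  intro array _
  unfold Spec_fillInterrupted
  exact fillInterrupted_eq array
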